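-- pv_equiv track=rewrite | github.com/dbaltaza/a-maze-ing | app/renderer_curses.py | _path_cell_sequence
-- ===== SOURCE A (Python) =====
-- def _path_cell_sequence(entry: tuple[int, int], moves: str) -> list[tuple[int, int]]:
--     x, y = entry
--     cells: list[tuple[int, int]] = [(x, y)]
--     deltas = {"N": (0, -1), "E": (1, 0), "S": (0, 1), "W": (-1, 0)}
--     for step in moves:
--         delta = deltas.get(step)
--         if delta is None:
--             continue
--         dx, dy = delta
--         x += dx
--         y += dy
--         cells.append((x, y))
--     return cells
-- ===== SOURCE B (Python) =====
-- def _path_cell_sequence(entry: tuple[int, int], moves: str) -> list[tuple[int, int]]: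
--     deltas = {"N": (0, -1), "E": (1, 0), "S": (0, 1), "W": (-1, 0)}
--     ds = [deltas[c] for c in moves if c in deltas]
--     xs = [entry[0]]
--     for dx, _ in ds:
--         xs.append(xs[-1] + dx)
--     ys = [entry[1]]
--     for _, dy in ds:
--         ys.append(ys[-1] + dy)
--     return list(zip(xs, ys))
-- ===== Notes on version B (the rewrite author's own statement) =====
-- stated objective: alternative
-- what changed: Instead of one accumulating loop over the string carrying (x, y) and appending to cells, B first filters the move string into a delta list, then computes the x- and y-coordinates as two independent prefix-sum lists and zips them into the cell sequence.
import Mathlib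
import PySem

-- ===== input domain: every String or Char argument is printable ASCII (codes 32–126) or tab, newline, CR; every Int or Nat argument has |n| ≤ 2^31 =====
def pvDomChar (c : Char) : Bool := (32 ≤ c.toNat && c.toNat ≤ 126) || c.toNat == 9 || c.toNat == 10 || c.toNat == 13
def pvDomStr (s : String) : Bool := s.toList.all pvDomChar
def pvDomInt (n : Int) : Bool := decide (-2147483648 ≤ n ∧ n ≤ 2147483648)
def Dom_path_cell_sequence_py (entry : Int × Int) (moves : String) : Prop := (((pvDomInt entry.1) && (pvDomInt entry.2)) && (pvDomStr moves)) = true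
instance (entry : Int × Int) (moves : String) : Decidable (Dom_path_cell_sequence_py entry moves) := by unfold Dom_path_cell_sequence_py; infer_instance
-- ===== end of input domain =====

-- B replaces A's single accumulating loop by filter-to-deltas, two per-coordinate prefix-sum lists, and a zip (alternative decomposition, same cost).


-- ===== PORT A =====
-- deltas = {"N": (0, -1), "E": (1, 0), "S": (0, 1), "W": (-1, 0)}
def pvDeltas : PySem.Dict Char (Int × Int) :=
  PySem.Dict.ofList [('N', (0, -1)), ('E', (1, 0)), ('S', (0, 1)), ('W', (-1, 0))]

-- one iteration of A's for-loop: state is (x, y, cells)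
def pvLoopA (st : Int × Int × List (Int × Int)) (step : Char) : Int × Int × List (Int × Int) :=
  match PySem.Dict.get? pvDeltas step with
  | none => st
  | some (dx, dy) =>
      let x := st.1 + dx
      let y := st.2.1 + dy
      (x, y, st.2.2 ++ [(x, y)])

def path_cell_sequence_py (entry : Int × Int) (moves : String) : List (Int × Int) :=
  (moves.toList.foldl pvLoopA (entry.1, entry.2, [(entry.1, entry.2)])).2.2

-- ===== PORT B =====
-- the loop 'xs.append(xs[-1] + d)' starting from x0: prefix sums including the start
def pvPrefix (x : Int) (ds : List Int) : List Int :=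
  match ds with
  | [] => [x]
  | d :: rest => x :: pvPrefix (x + d) rest

def path_cell_sequence_py_alt (entry : Int × Int) (moves : String) : List (Int × Int) :=
  let ds := moves.toList.filterMap (fun c => PySem.Dict.get? pvDeltas c)
  (pvPrefix entry.1 (ds.map Prod.fst)).zip (pvPrefix entry.2 (ds.map Prod.snd))

-- ===== PRECONDITION & SPEC =====
def Spec_path_cell_sequence_py (entry : Int × Int) (moves : String) (out : List (Int × Int)) : Prop := out = path_cell_sequence_py_alt entry moves
instance (entry : Int × Int) (moves : String) (out : List (Int × Int)) : Decidable (Spec_path_cell_sequence_py entry moves out) := by unfold Spec_path_cell_sequence_py; infer_instance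

-- ===== CLAIM (what is proved, stated in full; the proofs are below) =====
def Claim_equal_path_cell_sequence_py : Prop := ∀ (entry : Int × Int) (moves : String), Dom_path_cell_sequence_py entry moves → Spec_path_cell_sequence_py entry moves (path_cell_sequence_py entry moves)

-- ===== LEMMAS AND PROOFS =====

-- the cells A appends after starting at (x, y), as a direct recursion over the delta list
def pvRestD (x y : Int) (ds : List (Int × Int)) : List (Int × Int) :=
  match ds with
  | [] => []
  | (dx, dy) :: rest => (x + dx, y + dy) :: pvRestD (x + dx) (y + dy) rest

-- the cells A appends after starting at (x, y), as a direct recursion over the chars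
def pvRest (x y : Int) (cs : List Char) : List (Int × Int) :=
  match cs with
  | [] => []
  | c :: rest =>
      match PySem.Dict.get? pvDeltas c with
      | none => pvRest x y rest
      | some (dx, dy) => (x + dx, y + dy) :: pvRest (x + dx) (y + dy) rest

lemma pvFoldA_eq (cs : List Char) : ∀ (x y : Int) (acc : List (Int × Int)),
    (List.foldl pvLoopA (x, y, acc) cs).2.2 = acc ++ pvRest x y cs := by
  induction cs with
  | nil => intro x y acc; simp [pvRest]
  | cons c rest ih =>
      intro x y acc
      simp only [List.foldl, pvRest, pvLoopA]
      cases h : PySem.Dict.get? pvDeltas c with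
      | none => simp [ih]
      | some d =>
          obtain ⟨dx, dy⟩ := d
          simp [ih, List.append_assoc]

lemma pvZip_prefix (ds : List (Int × Int)) : ∀ (x y : Int),
    (pvPrefix x (ds.map Prod.fst)).zip (pvPrefix y (ds.map Prod.snd))
      = (x, y) :: pvRestD x y ds := by
  induction ds with
  | nil => intro x y; simp [pvPrefix, pvRestD]
  | cons d rest ih =>
      intro x y
      obtain ⟨dx, dy⟩ := d
      simp only [List.map, pvPrefix, List.zip_cons_cons, pvRestD]
      rw [ih]

lemma pvRest_eq_filterMap (cs : List Char) : ∀ (x y : Int),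
    pvRest x y cs = pvRestD x y (cs.filterMap (fun c => PySem.Dict.get? pvDeltas c)) := by
  induction cs with
  | nil => intro x y; simp [pvRest, pvRestD]
  | cons c rest ih =>
      intro x y
      simp only [pvRest, List.filterMap_cons]
      cases h : PySem.Dict.get? pvDeltas c with
      | none => simp [ih]
      | some d => obtain ⟨dx, dy⟩ := d; simp [pvRestD, ih]

-- ===== VERDICT (by name: the statement is the Claim_ definition above) =====
theorem path_cell_sequence_py_spec : Claim_equal_path_cell_sequence_py := by
  intro entry moves _
  unfold Spec_path_cell_sequence_py path_cell_sequence_py path_cell_sequence_py_alt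
  rw [pvFoldA_eq, pvZip_prefix, pvRest_eq_filterMap]
  simp
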